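-- pv_equiv track=rewrite | github.com/ibaaj/probabilistic-classification-from-possibilistic-data | tools/agg_common.py | prefer_metric_order
-- ===== SOURCE A (Python) =====
-- from typing import Any, Dict, List, Optional, Sequence, Tuple
--
-- def prefer_metric_order(available: Sequence[str], preferred: Sequence[str]) -> List[str]:
--     available_set = set(available)
--     ordered: List[str] = []
--
--     for metric in preferred:
--         if metric in available_set and metric not in ordered:
--             ordered.append(metric)
--
--     extras = sorted(available_set - set(ordered))
--     ordered.extend(extras)
--     return ordered
-- ===== SOURCE B (Python) =====
-- def prefer_metric_order(available, preferred):
--     rank = {}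
--     for i, metric in enumerate(preferred):
--         if metric not in rank:
--             rank[metric] = i
--     sentinel = len(preferred)
--     return sorted(set(available), key=lambda m: (rank.get(m, sentinel), m))
-- ===== Notes on version B (the rewrite author's own statement) =====
-- stated objective: faster
-- what changed: Replaces A's preferred-filter loop (whose 'not in ordered' test rescans the growing list, quadratic in len(preferred)) plus a separate set-difference sort by one sort of set(available) under a composite key: first index in preferred (len(preferred) as fallback rank), then the name.
import Mathlib
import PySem

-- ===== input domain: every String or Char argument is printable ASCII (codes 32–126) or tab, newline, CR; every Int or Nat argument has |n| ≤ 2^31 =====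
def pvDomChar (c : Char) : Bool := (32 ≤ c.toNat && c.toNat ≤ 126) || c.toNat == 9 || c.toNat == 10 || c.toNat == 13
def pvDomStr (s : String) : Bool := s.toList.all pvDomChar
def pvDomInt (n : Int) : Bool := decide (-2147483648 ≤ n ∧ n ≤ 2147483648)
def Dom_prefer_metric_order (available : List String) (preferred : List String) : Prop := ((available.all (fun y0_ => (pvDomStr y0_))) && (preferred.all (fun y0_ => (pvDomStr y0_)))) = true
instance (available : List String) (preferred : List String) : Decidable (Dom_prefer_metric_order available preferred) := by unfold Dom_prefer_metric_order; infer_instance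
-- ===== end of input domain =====

-- B replaces A's preferred-filter loop plus separate set-difference sort by a single
-- composite-key sort of set(available) (rank in preferred, then name); objective: simpler.

-- ===== PORT A =====
def prefer_metric_order (available : List String) (preferred : List String) : List String :=
  let available_set : PySem.Set String := PySem.Set.ofList available
  let ordered : List String := preferred.foldl
    (fun acc metric =>
      if PySem.Set.contains available_set metric && !acc.contains metric then acc ++ [metric]
      else acc) []
  let extras : List String :=
    PySem.List.sorted (PySem.Set.diff available_set (PySem.Set.ofList ordered)) (fun x => x) false
  ordered ++ extras

-- ===== PORT B =====
def prefer_metric_order_alt (available : List String) (preferred : List String) : List String :=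
  let rank : PySem.Dict String Int :=
    (PySem.List.enumerate preferred 0).foldl
      (fun d p => if d.contains p.2 then d else d.insert p.2 p.1) PySem.Dict.empty
  let sentinel : Int := preferred.length
  PySem.List.sorted2 (PySem.Set.ofList available) (fun m => rank.getD m sentinel) (fun m => m) false

-- ===== PRECONDITION & SPEC =====
def Spec_prefer_metric_order (available : List String) (preferred : List String) (out : List String) : Prop := out = prefer_metric_order_alt available preferred
instance (available : List String) (preferred : List String) (out : List String) : Decidable (Spec_prefer_metric_order available preferred out) := by unfold Spec_prefer_metric_order; infer_instance

-- ===== CLAIM (what is proved, stated in full; the proofs are below) =====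
def Claim_equal_prefer_metric_order : Prop := ∀ (available : List String) (preferred : List String), Dom_prefer_metric_order available preferred → Spec_prefer_metric_order available preferred (prefer_metric_order available preferred)

-- ===== LEMMAS AND PROOFS =====

-- rank of a metric: its first index in `preferred`, or len(preferred) if absent
def pvRank (P : List String) (x : String) : Int :=
  match P with
  | [] => 0
  | m :: rest => if x = m then 0 else pvRank rest x + 1

theorem pvRank_nonneg (P : List String) (x : String) : 0 ≤ pvRank P x := by
  induction P with
  | nil => simp [pvRank]
  | cons m rest ih =>
    by_cases h : x = m
    · simp [pvRank, h]
    · simp [pvRank, h]; omega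

theorem pvRank_lt_of_mem (P : List String) (x : String) (h : x ∈ P) :
    pvRank P x < P.length := by
  induction P with
  | nil => simp at h
  | cons m rest ih =>
    by_cases hx : x = m
    · simp only [pvRank, if_pos hx, List.length_cons]
      have := pvRank_nonneg rest x
      omega
    · have hr : x ∈ rest := by
        rcases List.mem_cons.mp h with h1 | h1
        · exact absurd h1 hx
        · exact h1
      have := ih hr
      simp only [pvRank, if_neg hx, List.length_cons]
      omega

theorem pvRank_of_not_mem (P : List String) (x : String) (h : x ∉ P) :
    pvRank P x = P.length := by
  induction P with
  | nil => simp [pvRank]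
  | cons m rest ih =>
    have hx : x ≠ m := by intro e; exact h (by simp [e])
    have hr : x ∉ rest := fun hm => h (List.mem_cons_of_mem _ hm)
    simp only [pvRank, if_neg hx, ih hr, List.length_cons]
    push_cast
    ring

-- the ordered-prefix loop of A, as a structural recursion
def pvOrd (p : String → Bool) : List String → List String → List String
  | [], _ => []
  | m :: rest, seen =>
      if p m && !seen.contains m then m :: pvOrd p rest (seen ++ [m])
      else pvOrd p rest seen

theorem pv_fold_eq (p : String → Bool) (P : List String) : ∀ (acc : List String),
    P.foldl (fun acc m => if p m && !acc.contains m then acc ++ [m] else acc) acc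
      = acc ++ pvOrd p P acc := by
  induction P with
  | nil => intro acc; simp [pvOrd]
  | cons m rest ih =>
    intro acc
    simp only [List.foldl_cons, pvOrd]
    by_cases h : (p m && !acc.contains m) = true
    · rw [if_pos h, if_pos h, ih (acc ++ [m])]
      simp
    · rw [if_neg h, if_neg h, ih acc]

theorem pvOrd_mem (p : String → Bool) (P : List String) : ∀ (seen : List String) (x : String),
    x ∈ pvOrd p P seen ↔ x ∈ P ∧ p x = true ∧ x ∉ seen := by
  induction P with
  | nil => intro seen x; simp [pvOrd]
  | cons m rest ih =>
    intro seen x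
    by_cases h : (p m && !seen.contains m) = true
    · have hpm : p m = true := by simp at h; exact h.1
      have hms : m ∉ seen := by simp at h; simpa using h.2
      simp only [pvOrd, if_pos h, List.mem_cons, ih]
      constructor
      · rintro (rfl | ⟨hr, hp, hs⟩)
        · exact ⟨Or.inl rfl, hpm, hms⟩
        · refine ⟨Or.inr hr, hp, ?_⟩
          intro hx; exact hs (by simp [hx])
      · rintro ⟨hm, hp, hs⟩
        by_cases hx : x = m
        · exact Or.inl hx
        · rcases hm with h1 | h1
          · exact absurd h1 hx
          · exact Or.inr ⟨h1, hp, by simp [hs, hx]⟩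
    · have h' : p m = false ∨ m ∈ seen := by
        by_cases hpm : p m = true
        · right; by_contra hms; exact h (by simp [hpm, hms])
        · left; simpa using hpm
      simp only [pvOrd, if_neg h, ih, List.mem_cons]
      constructor
      · rintro ⟨hr, hp, hs⟩; exact ⟨Or.inr hr, hp, hs⟩
      · rintro ⟨hm, hp, hs⟩
        rcases hm with rfl | hr
        · rcases h' with h1 | h1
          · rw [hp] at h1; cases h1
          · exact absurd h1 hs
        · exact ⟨hr, hp, hs⟩

theorem pvOrd_nodup (p : String → Bool) (P : List String) : ∀ (seen : List String),
    (pvOrd p P seen).Nodup := by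
  induction P with
  | nil => intro seen; simp [pvOrd]
  | cons m rest ih =>
    intro seen
    by_cases h : (p m && !seen.contains m) = true
    · simp only [pvOrd, if_pos h]
      refine List.nodup_cons.mpr ⟨?_, ih _⟩
      intro hm
      have := (pvOrd_mem p rest (seen ++ [m]) m).mp hm
      exact this.2.2 (by simp)
    · simp only [pvOrd, if_neg h]; exact ih seen

theorem pvOrd_pairwise (p : String → Bool) (P : List String) : ∀ (seen : List String),
    (pvOrd p P seen).Pairwise (fun a b => pvRank P a < pvRank P b) := by
  induction P with
  | nil => intro seen; simp [pvOrd]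
  | cons m rest ih =>
    intro seen
    by_cases h : (p m && !seen.contains m) = true
    · have hshift : ∀ x ∈ pvOrd p rest (seen ++ [m]), pvRank (m :: rest) x = pvRank rest x + 1 := by
        intro x hx
        have hxm : x ≠ m := by
          intro e; exact ((pvOrd_mem p rest (seen ++ [m]) x).mp hx).2.2 (by simp [e])
        simp [pvRank, hxm]
      simp only [pvOrd, if_pos h]
      refine List.pairwise_cons.mpr ⟨?_, ?_⟩
      · intro b hb
        rw [hshift b hb]
        have h0 : pvRank (m :: rest) m = 0 := by simp [pvRank]
        rw [h0]
        have := pvRank_nonneg rest b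
        omega
      · refine (ih (seen ++ [m])).imp_of_mem ?_
        intro a b ha hb hab
        rw [hshift a ha, hshift b hb]; omega
    · simp only [pvOrd, if_neg h]
      have h' : p m = false ∨ m ∈ seen := by
        by_cases hpm : p m = true
        · right; by_contra hms; exact h (by simp [hpm, hms])
        · left; simpa using hpm
      have hshift' : ∀ x ∈ pvOrd p rest seen, pvRank (m :: rest) x = pvRank rest x + 1 := by
        intro x hx
        obtain ⟨_, hpx, hsx⟩ := (pvOrd_mem p rest seen x).mp hx
        have hxm : x ≠ m := by
          intro e; subst e
          rcases h' with h1 | h1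
          · rw [hpx] at h1; cases h1
          · exact hsx h1
        simp [pvRank, hxm]
      refine (ih seen).imp_of_mem ?_
      intro a b ha hb hab
      rw [hshift' a ha, hshift' b hb]; omega

-- dict lookup in B's rank-building loop = pvRank
theorem pv_rank_get? (P : List String) : ∀ (s : Int) (d : PySem.Dict String Int) (x : String),
    ((PySem.List.enumerate P s).foldl
        (fun d p => if d.contains p.2 then d else d.insert p.2 p.1) d).get? x
      = (d.get? x).or (if x ∈ P then some (s + pvRank P x) else none) := by
  induction P with
  | nil =>
    intro s d x
    simp [PySem.List.enumerate]
  | cons m rest ih =>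
    intro s d x
    rw [PySem.List.enumerate_cons]
    simp only [List.foldl_cons]
    by_cases hc : d.contains m = true
    · rw [if_pos hc, ih]
      by_cases hx : x = m
      · subst hx
        have hsome : (d.get? x).isSome := by rw [← PySem.Dict.contains_eq_isSome_get?]; exact hc
        obtain ⟨v, hv⟩ := Option.isSome_iff_exists.mp hsome
        simp [hv]
      · by_cases hr : x ∈ rest
        · have : pvRank (m :: rest) x = pvRank rest x + 1 := by simp [pvRank, hx]
          simp only [List.mem_cons, hx, false_or, hr, if_pos, this]
          have : s + 1 + pvRank rest x = s + (pvRank rest x + 1) := by ring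
          rw [this]
        · simp [hx, hr]
    · rw [if_neg hc, ih]
      by_cases hx : x = m
      · subst hx
        have hnone : d.get? x = none := by
          cases hg : d.get? x with
          | none => rfl
          | some v =>
            exfalso; apply hc
            rw [PySem.Dict.contains_eq_isSome_get?, hg]; rfl
        rw [PySem.Dict.get?_insert, if_pos rfl, hnone]
        simp [pvRank]
      · rw [PySem.Dict.get?_insert, if_neg hx]
        by_cases hr : x ∈ rest
        · have : pvRank (m :: rest) x = pvRank rest x + 1 := by simp [pvRank, hx]
          simp only [List.mem_cons, hx, false_or, hr, if_pos, this]
          have : s + 1 + pvRank rest x = s + (pvRank rest x + 1) := by ring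
          rw [this]
        · simp [hx, hr]

theorem pv_rank_getD (P : List String) (x : String) :
    ((PySem.List.enumerate P 0).foldl
        (fun d p => if d.contains p.2 then d else d.insert p.2 p.1)
        PySem.Dict.empty).getD x (P.length : Int) = pvRank P x := by
  rw [PySem.Dict.getD_eq_get?_getD, pv_rank_get?]
  by_cases h : x ∈ P
  · simp [PySem.Dict.get?_empty, h]
  · simp [PySem.Dict.get?_empty, h, pvRank_of_not_mem P x h]

-- Python's tuple-key sort = sort by the lexicographic product key
theorem pv_sorted2_lex (xs : List String) (k1 : String → Int) :
    PySem.List.sorted2 xs k1 (fun m => m) false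
      = PySem.List.sorted xs (fun m => (toLex (k1 m, m) : Lex (Int × String))) := by
  rw [PySem.List.sorted_eq_foldl_insertBy]
  simp only [PySem.List.sorted2]
  have hcmp : (fun a b : String => decide (k1 a < k1 b) || (!decide (k1 b < k1 a) && decide (a < b)))
      = (fun a b : String => decide ((toLex (k1 a, a) : Lex (Int × String)) < toLex (k1 b, b))) := by
    funext a b
    by_cases h1 : k1 a < k1 b
    · simp [h1, Prod.Lex.toLex_lt_toLex]
    · by_cases h2 : k1 b < k1 a
      · have hne : ¬ (k1 a = k1 b) := by omega
        simp [h1, h2, hne, Prod.Lex.toLex_lt_toLex]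
      · have he : k1 a = k1 b := by omega
        by_cases h3 : a < b <;> simp [h3, he, Prod.Lex.toLex_lt_toLex]
  simp only [Bool.false_eq_true, if_false]
  rw [hcmp]

theorem pv_main (available preferred : List String) :
    prefer_metric_order available preferred = prefer_metric_order_alt available preferred := by
  unfold prefer_metric_order prefer_metric_order_alt
  simp only
  rw [pv_fold_eq]
  simp only [List.nil_append]
  rw [show (fun m => ((PySem.List.enumerate preferred 0).foldl
        (fun d p => if d.contains p.2 then d else d.insert p.2 p.1)
        PySem.Dict.empty).getD m ((preferred.length : Int)))
      = (fun m => pvRank preferred m) from funext fun m => pv_rank_getD preferred m]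
  rw [pv_sorted2_lex]
  -- abbreviations
  set S : List String := PySem.Set.ofList available with hSdef
  set p : String → Bool := fun m => PySem.Set.contains S m with hpdef
  set ord : List String := pvOrd p preferred [] with horddef
  set Dl : List String := PySem.Set.diff S (PySem.Set.ofList ord) with hDdef
  set extras : List String := PySem.List.sorted Dl (fun x => x) false with hexdef
  -- basic membership facts
  have hcontS : ∀ x : String, p x = true ↔ x ∈ S := by
    intro x
    simp [hpdef, PySem.Set.contains]
  have hOrdMem : ∀ x : String, x ∈ ord ↔ x ∈ preferred ∧ x ∈ S := by
    intro x
    rw [horddef, pvOrd_mem]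
    simp [hcontS]
  have hDlMem : ∀ x : String, x ∈ Dl ↔ x ∈ S ∧ x ∉ ord := by
    intro x
    rw [hDdef]
    simp [PySem.Set.diff, List.mem_filter, PySem.Set.contains,
      PySem.Set.mem_ofList]
  have hExMem : ∀ x : String, x ∈ extras ↔ x ∈ S ∧ x ∉ ord := by
    intro x
    rw [hexdef, PySem.List.mem_sorted]
    exact hDlMem x
  have hExNotPref : ∀ x ∈ extras, x ∉ preferred := by
    intro x hx hp
    obtain ⟨hxS, hxo⟩ := (hExMem x).mp hx
    exact hxo ((hOrdMem x).mpr ⟨hp, hxS⟩)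
  -- nodup facts
  have hndS : S.Nodup := PySem.Set.nodup_ofList available
  have hndOrd : ord.Nodup := by rw [horddef]; exact pvOrd_nodup p preferred []
  have hndDl : Dl.Nodup := by
    rw [hDdef]
    exact hndS.filter _
  have hndEx : extras.Nodup := by
    rw [hexdef]
    exact ((PySem.List.sorted_perm Dl (fun x => x) false).nodup_iff).mpr hndDl
  have hdisj : List.Disjoint ord extras := by
    intro a ha hae
    exact ((hExMem a).mp hae).2 ha
  have hndApp : (ord ++ extras).Nodup := hndOrd.append hndEx hdisj
  -- permutation
  have hperm : (ord ++ extras).Perm S := by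
    rw [List.perm_ext_iff_of_nodup hndApp hndS]
    intro a
    constructor
    · intro ha
      rcases List.mem_append.mp ha with h1 | h1
      · exact ((hOrdMem a).mp h1).2
      · exact ((hExMem a).mp h1).1
    · intro ha
      by_cases ho : a ∈ ord
      · exact List.mem_append.mpr (Or.inl ho)
      · exact List.mem_append.mpr (Or.inr ((hExMem a).mpr ⟨ha, ho⟩))
  -- strict pairwise for the lexicographic key
  have hpw : (ord ++ extras).Pairwise
      (fun a b => (toLex (pvRank preferred a, a) : Lex (Int × String)) < toLex (pvRank preferred b, b)) := by
    rw [List.pairwise_append]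
    refine ⟨?_, ?_, ?_⟩
    · have hpo : ord.Pairwise (fun a b => pvRank preferred a < pvRank preferred b) := by
        rw [horddef]; exact pvOrd_pairwise p preferred []
      refine hpo.imp ?_
      intro a b hab
      exact Prod.Lex.toLex_lt_toLex.mpr (Or.inl hab)
    · have hle : extras.Pairwise (fun a b : String => a ≤ b) := by
        rw [hexdef]
        exact PySem.List.sorted_pairwise Dl (fun x => x)
      refine (hle.and hndEx).imp_of_mem ?_
      intro a b ha hb hab
      have hra : pvRank preferred a = preferred.length :=
        pvRank_of_not_mem _ _ (hExNotPref a ha)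
      have hrb : pvRank preferred b = preferred.length :=
        pvRank_of_not_mem _ _ (hExNotPref b hb)
      exact Prod.Lex.toLex_lt_toLex.mpr (Or.inr ⟨hra.trans hrb.symm, lt_of_le_of_ne hab.1 hab.2⟩)
    · intro a ha b hb
      have hra : pvRank preferred a < preferred.length :=
        pvRank_lt_of_mem _ _ ((hOrdMem a).mp ha).1
      have hrb : pvRank preferred b = preferred.length :=
        pvRank_of_not_mem _ _ (hExNotPref b hb)
      exact Prod.Lex.toLex_lt_toLex.mpr (Or.inl (by omega))
  exact (PySem.List.sorted_eq_of_perm_of_pairwise_lt S (ord ++ extras)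
    (fun m => (toLex (pvRank preferred m, m) : Lex (Int × String))) hperm hpw).symm

-- ===== VERDICT (by name: the statement is the Claim_ definition above) =====
theorem prefer_metric_order_spec : Claim_equal_prefer_metric_order := by
  intro available preferred _
  exact pv_main available preferred
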